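-- pv_equiv track=rewrite | github.com/envomp/2018-Introduction-to-Programming | kt3/exam.py | take_partial
-- ===== SOURCE A (Python) =====
-- def take_partial(text: str, leave_count: int, take_count: int) -> str:
--     """
--     Take only part of the string.
--
--     Ignore first leave_count symbols, then use next take_count symbols.
--     Repeat the process until the end of the string.
--
--     The following conditions are met (you don't have to check those):
--     leave_count >= 0
--     take_count >= 0
--     leave_count + take_count > 0
--
--     take_partial("abcdef", 2, 3) => "cde"
--     take_partial("abcdef", 0, 1) => "abcdef"
--     take_partial("abcdef", 1, 0) => ""
--     """
--     result = ""
--     for i in range(0, len(text), leave_count + take_count):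
--         result += text[i + leave_count:i + leave_count + take_count]
--     """
--     while len(text) > 0:
--         result += text[leave_count:leave_count + take_count]
--         text = text[leave_count + take_count:]
--     """
--     return result
-- ===== SOURCE B (Python) =====
-- def take_partial(text: str, leave_count: int, take_count: int) -> str:
--     period = leave_count + take_count
--     return "".join(ch for i, ch in enumerate(text) if i % period >= leave_count)
-- ===== Notes on version B (the rewrite author's own statement) =====
-- stated objective: idiomatic
-- what changed: Replaces the block-slicing loop (range over block starts plus slice concatenation) by a single pass over enumerate(text) that keeps each character whose index i satisfies i % period >= leave_count, joined once at the end.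
-- outside the precondition, e.g. on take_partial('abc', -1, 2): A returns 'abbc', B returns 'abc'; on take_partial('abc', 0, -2): A returns '', B returns 'ac'; on take_partial('abc', 0, 0): A raises ValueError, B raises ZeroDivisionError
import Mathlib
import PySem

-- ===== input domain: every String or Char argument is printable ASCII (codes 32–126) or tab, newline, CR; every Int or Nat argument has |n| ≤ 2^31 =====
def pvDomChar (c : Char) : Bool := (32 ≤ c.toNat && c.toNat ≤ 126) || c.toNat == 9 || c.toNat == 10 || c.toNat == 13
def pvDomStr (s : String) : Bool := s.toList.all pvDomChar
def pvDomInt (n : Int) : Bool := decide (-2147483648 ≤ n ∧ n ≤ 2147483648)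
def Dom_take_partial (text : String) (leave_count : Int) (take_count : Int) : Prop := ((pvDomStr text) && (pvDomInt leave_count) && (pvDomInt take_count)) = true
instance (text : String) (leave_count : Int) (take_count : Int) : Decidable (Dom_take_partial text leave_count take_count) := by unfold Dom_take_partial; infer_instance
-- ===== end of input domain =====

-- B replaces A's block-slicing loop by a single pass keeping the characters whose index i
-- satisfies i % (leave_count + take_count) >= leave_count (idiomatic; same asymptotic cost).

-- ===== PORT A =====
-- result = ""; for i in range(0, len(text), leave_count + take_count):
--   result += text[i + leave_count : i + leave_count + take_count]
def take_partial (text : String) (leave_count : Int) (take_count : Int) : String :=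
  String.ofList
    ((PySem.List.pyRange 0 (PySem.List.len text.toList) (leave_count + take_count)).foldl
      (fun result i =>
        result ++ PySem.List.slice text.toList (some (i + leave_count)) (some (i + leave_count + take_count)))
      [])

-- ===== PORT B =====
-- period = leave_count + take_count
-- return "".join(ch for i, ch in enumerate(text) if i % period >= leave_count)
def take_partial_alt (text : String) (leave_count : Int) (take_count : Int) : String :=
  String.ofList
    (((PySem.List.enumerate text.toList 0).filter
        (fun p => decide (leave_count ≤ PySem.Int.mod p.1 (leave_count + take_count)))).map (·.2))

-- ===== PRECONDITION & SPEC =====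
-- Pre_ covers the function's documented contract ("you don't have to check those":
-- leave_count >= 0, take_count >= 0, leave_count + take_count > 0) and, beyond it, every
-- take_count < 0 with leave_count > 0 (both programs return "" there).  It excludes
-- leave_count + take_count = 0, where A raises ValueError (range() step 0), and the inputs
-- outside the documented domain where A's value is a negative-index slicing artefact that B
-- does not reproduce: leave_count < 0 (overlapping blocks) and leave_count = 0 with
-- take_count < 0 (negative range step vs negative modulus).
def Pre_take_partial (text : String) (leave_count : Int) (take_count : Int) : Prop :=
  0 ≤ leave_count ∧ leave_count + take_count ≠ 0 ∧ (take_count < 0 → 0 < leave_count)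
instance (text : String) (leave_count : Int) (take_count : Int) : Decidable (Pre_take_partial text leave_count take_count) := by unfold Pre_take_partial; infer_instance

def pvWitness_take_partial : String × Int × Int := ("abcdef", 2, 3)

def Spec_take_partial (text : String) (leave_count : Int) (take_count : Int) (out : String) : Prop := out = take_partial_alt text leave_count take_count
instance (text : String) (leave_count : Int) (take_count : Int) (out : String) : Decidable (Spec_take_partial text leave_count take_count out) := by unfold Spec_take_partial; infer_instance

-- ===== CLAIM (what is proved, stated in full; the proofs are below) =====
def Claim_equal_take_partial : Prop := ∀ (text : String) (leave_count : Int) (take_count : Int), Dom_take_partial text leave_count take_count → Pre_take_partial text leave_count take_count → Spec_take_partial text leave_count take_count (take_partial text leave_count take_count)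

-- ===== LEMMAS AND PROOFS =====

lemma pvRange_shift (n P : ℤ) (hP : 0 < P) :
    PySem.List.pyRange 0 n P =
      if 0 < n then 0 :: (PySem.List.pyRange 0 (n - P) P).map (· + P) else [] := by
  rw [PySem.List.pyRange_of_pos 0 n hP, PySem.List.pyRange_of_pos 0 (n - P) hP]
  by_cases hn : 0 < n
  · have hcnt : (if (0:ℤ) < n then ((n - 0 + P - 1) / P).toNat else 0)
        = (if (0:ℤ) < n - P then ((n - P - 0 + P - 1) / P).toNat else 0) + 1 := by
      by_cases hnP : 0 < n - P
      · have harg : n - 0 + P - 1 = (n - P - 0 + P - 1) + 1 * P := by ring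
        have h0 : 0 ≤ (n - P - 0 + P - 1) / P := Int.ediv_nonneg (by omega) (by omega)
        rw [if_pos hn, if_pos hnP, harg, Int.add_mul_ediv_right _ _ (by omega : P ≠ 0)]
        omega
      · have hub : (n - 0 + P - 1) / P < 2 := by rw [Int.ediv_lt_iff_lt_mul hP]; omega
        have hlb : 1 ≤ (n - 0 + P - 1) / P := by rw [Int.le_ediv_iff_mul_le hP]; omega
        rw [if_pos hn, if_neg hnP]
        omega
    rw [hcnt, if_pos hn, List.range_succ_eq_map, List.map_cons, List.map_map, List.map_map]
    refine congrArg₂ List.cons (by push_cast; ring) (List.map_congr_left fun k _ => ?_)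
    simp only [Function.comp]
    push_cast
    ring
  · simp [hn]

def pvF (L T : ℕ) : List Char → List Char
  | [] => []
  | c :: cs => List.take T (List.drop L (c :: cs)) ++ pvF L T (List.drop (L + T - 1) cs)
termination_by l => l.length
decreasing_by simp

lemma pvF_cons_pos (L T : ℕ) (hP : 0 < L + T) (c : Char) (cs : List Char) :
    pvF L T (c :: cs) = List.take T (List.drop L (c :: cs)) ++ pvF L T (List.drop (L + T) (c :: cs)) := by
  rw [show List.drop (L + T) (c :: cs) = List.drop (L + T - 1) cs from by
        have h := List.drop_succ_cons (i := L + T - 1) (a := c) (l := cs)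
        rw [show L + T - 1 + 1 = L + T by omega] at h
        exact h]
  simp [pvF]

lemma pvAside (L T : ℕ) (hP : 0 < L + T) : ∀ (n : ℕ) (l : List Char), l.length ≤ n →
    (PySem.List.pyRange 0 (l.length : ℤ) ((L : ℤ) + (T : ℤ))).flatMap
        (fun i => PySem.List.slice l (some (i + (L : ℤ))) (some (i + (L : ℤ) + (T : ℤ))))
      = pvF L T l := by
  intro n
  induction n with
  | zero =>
    intro l hl
    have h : l = [] := List.eq_nil_of_length_eq_zero (by omega)
    subst h
    simp [pvF.eq_def, PySem.List.pyRange]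
  | succ n ih =>
    intro l hl
    match l with
    | [] => simp [pvF.eq_def, PySem.List.pyRange]
    | c :: cs =>
      have hPZ : (0 : ℤ) < (L : ℤ) + (T : ℤ) := by exact_mod_cast hP
      rw [pvRange_shift _ _ hPZ, if_pos (by simp)]
      rw [List.flatMap_cons, List.flatMap_map]
      rw [pvF_cons_pos L T hP]
      congr 1
      · rw [PySem.List.slice_toNat _ (by omega) (by omega)]
        rw [show ((0:ℤ) + (L:ℤ) + (T:ℤ)).toNat = L + T by omega,
            show ((0:ℤ) + (L:ℤ)).toNat = L by omega,
            show L + T - L = T by omega]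
      · have hfun : (PySem.List.pyRange 0 (((c :: cs).length : ℤ) - ((L:ℤ) + (T:ℤ))) ((L:ℤ) + (T:ℤ))).flatMap
            (fun i => PySem.List.slice (c :: cs) (some (i + ((L:ℤ)+(T:ℤ)) + (L:ℤ))) (some (i + ((L:ℤ)+(T:ℤ)) + (L:ℤ) + (T:ℤ))))
            = (PySem.List.pyRange 0 (((c :: cs).length : ℤ) - ((L:ℤ) + (T:ℤ))) ((L:ℤ) + (T:ℤ))).flatMap
            (fun i => PySem.List.slice (List.drop (L + T) (c :: cs)) (some (i + (L:ℤ))) (some (i + (L:ℤ) + (T:ℤ)))) := by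
          rw [List.flatMap, List.flatMap]
          refine congrArg List.flatten (List.map_congr_left fun i hi => ?_)
          have h0i : 0 ≤ i := ((PySem.List.mem_pyRange_iff_of_pos hPZ i).1 hi).1
          rw [PySem.List.slice_toNat _ (by omega) (by omega),
              PySem.List.slice_toNat _ (by omega) (by omega), List.drop_drop]
          rw [show (i + ((L:ℤ)+(T:ℤ)) + (L:ℤ) + (T:ℤ)).toNat - (i + ((L:ℤ)+(T:ℤ)) + (L:ℤ)).toNat
                = (i + (L:ℤ) + (T:ℤ)).toNat - (i + (L:ℤ)).toNat by omega,
              show (i + ((L:ℤ)+(T:ℤ)) + (L:ℤ)).toNat = (L + T) + (i + (L:ℤ)).toNat by omega]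
        have hrange : PySem.List.pyRange 0 (((c :: cs).length : ℤ) - ((L:ℤ)+(T:ℤ))) ((L:ℤ)+(T:ℤ))
            = PySem.List.pyRange 0 (((List.drop (L + T) (c :: cs)).length : ℤ)) ((L:ℤ)+(T:ℤ)) := by
          by_cases hle : L + T ≤ (c :: cs).length
          · congr 1
            rw [List.length_drop]
            omega
          · have hd : List.drop (L + T) (c :: cs) = [] :=
              List.drop_eq_nil_of_le (by simp only [List.length_cons] at hle ⊢; omega)
            rw [hd]
            rw [show PySem.List.pyRange 0 ((([] : List Char).length : ℤ)) ((L:ℤ)+(T:ℤ)) = []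
                  from (pvRange_shift _ _ hPZ).trans (by simp)]
            rw [pvRange_shift _ _ hPZ]
            rw [if_neg (by simp only [List.length_cons] at hle ⊢; omega)]
        rw [hfun, hrange]
        exact ih _ (by have h := hl; simp only [List.length_cons] at h; simp only [List.length_drop, List.length_cons]; omega)

lemma pvBblock (L T : ℕ) : ∀ (a : List Char) (s : ℕ), s + a.length ≤ L + T →
    ((PySem.List.enumerate a (s : ℤ)).filter
        (fun p => decide ((L:ℤ) ≤ PySem.Int.mod p.1 ((L:ℤ) + (T:ℤ))))).map (·.2) = List.drop (L - s) a := by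
  intro a
  induction a with
  | nil => intro s h; simp [PySem.List.enumerate]
  | cons c cs ih =>
    intro s h
    rw [PySem.List.enumerate_cons]
    have hs : s < L + T := by simp only [List.length_cons] at h; omega
    have hmod : PySem.Int.mod (s : ℤ) ((L:ℤ) + (T:ℤ)) = (s : ℤ) := by
      rw [show ((L:ℤ) + (T:ℤ)) = ((L + T : ℕ) : ℤ) from by push_cast; ring,
          PySem.Int.mod_natCast, Nat.mod_eq_of_lt hs]
    have hstep : ((s : ℤ) + 1) = ((s + 1 : ℕ) : ℤ) := by push_cast; ring
    by_cases hLs : L ≤ s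
    · rw [List.filter_cons_of_pos (by simp [hmod]; exact_mod_cast hLs)]
      rw [List.map_cons, hstep, ih (s+1) (by simp only [List.length_cons] at h; omega)]
      rw [show L - s = 0 by omega, show L - (s+1) = 0 by omega]
      simp
    · rw [List.filter_cons_of_neg (by simp [hmod]; omega)]
      rw [hstep, ih (s+1) (by simp only [List.length_cons] at h; omega)]
      rw [show L - s = (L - (s+1)) + 1 by omega, List.drop_succ_cons]

lemma pvBshift (L T : ℕ) (hP : 0 < L + T) : ∀ (cs : List Char) (s : ℤ),
    ((PySem.List.enumerate cs (s + ((L:ℤ) + (T:ℤ)))).filter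
        (fun p => decide ((L:ℤ) ≤ PySem.Int.mod p.1 ((L:ℤ) + (T:ℤ))))).map (·.2)
      = ((PySem.List.enumerate cs s).filter
        (fun p => decide ((L:ℤ) ≤ PySem.Int.mod p.1 ((L:ℤ) + (T:ℤ))))).map (·.2) := by
  intro cs
  induction cs with
  | nil => intro s; simp [PySem.List.enumerate]
  | cons c cs ih =>
    intro s
    rw [PySem.List.enumerate_cons, PySem.List.enumerate_cons]
    have hPZ : (0:ℤ) < (L:ℤ) + (T:ℤ) := by exact_mod_cast hP
    have hmod : PySem.Int.mod (s + ((L:ℤ)+(T:ℤ))) ((L:ℤ)+(T:ℤ)) = PySem.Int.mod s ((L:ℤ)+(T:ℤ)) := by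
      rw [PySem.Int.mod_eq_emod_of_pos hPZ, PySem.Int.mod_eq_emod_of_pos hPZ,
          Int.add_emod_right]
    have hstep : s + ((L:ℤ)+(T:ℤ)) + 1 = (s + 1) + ((L:ℤ)+(T:ℤ)) := by ring
    by_cases hc : (L:ℤ) ≤ PySem.Int.mod s ((L:ℤ)+(T:ℤ))
    · rw [List.filter_cons_of_pos (by simp [hmod, hc]), List.filter_cons_of_pos (by simp [hc])]
      rw [List.map_cons, List.map_cons, hstep, ih (s+1)]
    · rw [List.filter_cons_of_neg (by simp [hmod, hc]), List.filter_cons_of_neg (by simp [hc])]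
      rw [hstep, ih (s+1)]

lemma pvBside (L T : ℕ) (hP : 0 < L + T) : ∀ (n : ℕ) (l : List Char), l.length ≤ n →
    ((PySem.List.enumerate l 0).filter
        (fun p => decide ((L:ℤ) ≤ PySem.Int.mod p.1 ((L:ℤ) + (T:ℤ))))).map (·.2) = pvF L T l := by
  intro n
  induction n with
  | zero =>
    intro l hl
    have h : l = [] := List.eq_nil_of_length_eq_zero (by omega)
    subst h
    simp [pvF.eq_def, PySem.List.enumerate]
  | succ n ih =>
    intro l hl
    match l with
    | [] => simp [pvF.eq_def, PySem.List.enumerate]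
    | c :: cs =>
      rw [pvF_cons_pos L T hP]
      conv_lhs => rw [← List.take_append_drop (L + T) (c :: cs)]
      rw [PySem.List.enumerate_append, List.filter_append, List.map_append]
      congr 1
      · have hb := pvBblock L T (List.take (L + T) (c :: cs)) 0 (by simp)
        simp only [Nat.cast_zero, Nat.sub_zero] at hb
        rw [hb, List.drop_take, show L + T - L = T by omega]
      · by_cases hle : L + T ≤ (c :: cs).length
        · have hlen : (List.take (L + T) (c :: cs)).length = L + T := by
            rw [List.length_take]; omega
          rw [hlen, show ((L + T : ℕ) : ℤ) = (L:ℤ) + (T:ℤ) from by push_cast; ring]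
          rw [show (0 : ℤ) + ((L:ℤ) + (T:ℤ)) = (0:ℤ) + ((L:ℤ) + (T:ℤ)) from rfl]
          rw [pvBshift L T hP (List.drop (L + T) (c :: cs)) 0]
          exact ih _ (by simp only [List.length_drop, List.length_cons] at hl ⊢; omega)
        · have hd : List.drop (L + T) (c :: cs) = [] :=
            List.drop_eq_nil_of_le (by omega)
          rw [hd]
          simp [pvF.eq_def, PySem.List.enumerate]

lemma pvRange_neg (n s : ℤ) (hs : s < 0) (hn : 0 ≤ n) : PySem.List.pyRange 0 n s = [] := by
  simp [PySem.List.pyRange, show ¬ 0 < s by omega, show ¬ n < 0 by omega]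

-- take_count < 0, 0 < period: every slice of A is empty, every index fails B's test
lemma pvEmpty_pos (l : List Char) (lc tc : ℤ) (ht : tc < 0)
    (hp : 0 < lc + tc) :
    (PySem.List.pyRange 0 (l.length : ℤ) (lc + tc)).flatMap
        (fun i => PySem.List.slice l (some (i + lc)) (some (i + lc + tc))) = [] ∧
    ((PySem.List.enumerate l 0).filter
        (fun p => decide (lc ≤ PySem.Int.mod p.1 (lc + tc)))).map (·.2) = [] := by
  constructor
  · rw [List.flatMap_eq_nil_iff]
    intro i hi
    have h0i : 0 ≤ i := ((PySem.List.mem_pyRange_iff_of_pos hp i).1 hi).1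
    rw [PySem.List.slice_toNat _ (by omega) (by omega),
        show (i + lc + tc).toNat - (i + lc).toNat = 0 by omega, List.take_zero]
  · rw [List.map_eq_nil_iff, List.filter_eq_nil_iff]
    intro p _
    have hm := PySem.Int.mod_lt (a := p.1) (b := lc + tc) hp
    simp only [decide_eq_true_eq, not_le]
    omega

-- take_count < 0, period < 0: A's range is empty, B's modulus is never ≥ leave_count > 0
lemma pvEmpty_neg (l : List Char) (lc tc : ℤ) (hl0 : 0 < lc) (hneg : lc + tc < 0) :
    (PySem.List.pyRange 0 (l.length : ℤ) (lc + tc)).flatMap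
        (fun i => PySem.List.slice l (some (i + lc)) (some (i + lc + tc))) = [] ∧
    ((PySem.List.enumerate l 0).filter
        (fun p => decide (lc ≤ PySem.Int.mod p.1 (lc + tc)))).map (·.2) = [] := by
  constructor
  · rw [pvRange_neg _ _ hneg (by positivity)]
    simp
  · rw [List.map_eq_nil_iff, List.filter_eq_nil_iff]
    intro p _
    have hm := (PySem.Int.mod_neg_bounds (a := p.1) (b := lc + tc) hneg).2
    simp only [decide_eq_true_eq, not_le]
    omega

-- ===== VERDICT (by name: the statement is the Claim_ definition above) =====
theorem take_partial_spec : Claim_equal_take_partial := by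
  intro text leave_count take_count hDom hPre
  obtain ⟨h1, h2, h3⟩ := hPre
  unfold Spec_take_partial take_partial take_partial_alt
  rw [PySem.List.foldl_append_eq_flatMap, List.nil_append, PySem.List.len_eq]
  by_cases ht : 0 ≤ take_count
  · lift leave_count to ℕ using h1 with L
    lift take_count to ℕ using ht with T
    have hP : 0 < L + T := by omega
    exact congrArg String.ofList
      ((pvAside L T hP text.toList.length text.toList le_rfl).trans
        (pvBside L T hP text.toList.length text.toList le_rfl).symm)
  · replace ht : take_count < 0 := by omega
    have hl0 : 0 < leave_count := h3 ht
    by_cases hp : 0 < leave_count + take_count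
    · obtain ⟨hA, hB⟩ := pvEmpty_pos text.toList leave_count take_count ht hp
      rw [hA, hB]
    · obtain ⟨hA, hB⟩ := pvEmpty_neg text.toList leave_count take_count hl0 (by omega)
      rw [hA, hB]
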